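-- pv_equiv track=rewrite | github.com/joilsonsr/simulador_roleta_com_grafico | simulador_rodadas_com_graficos.py | calcular_repeticoes_recentes
-- ===== SOURCE A (Python) =====
-- def calcular_repeticoes_recentes(resultados):
--     """
--     Calcula o número de repetições consecutivas recentes para cada coluna.
--
--     Parâmetros:
--     - resultados: Lista de tuplas no formato [[numero, cor], ...].
--
--     Retorna:
--     - Um dicionário com o número de repetições recentes para cada coluna.
--     """
--     # Mapeamento dos números para as colunas
--     colunas = {
--         1: "coluna_1", 4: "coluna_1", 7: "coluna_1", 10: "coluna_1", 13: "coluna_1", 16: "coluna_1",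
--         19: "coluna_1", 22: "coluna_1", 25: "coluna_1", 28: "coluna_1", 31: "coluna_1", 34: "coluna_1",
--         2: "coluna_2", 5: "coluna_2", 8: "coluna_2", 11: "coluna_2", 14: "coluna_2", 17: "coluna_2",
--         20: "coluna_2", 23: "coluna_2", 26: "coluna_2", 29: "coluna_2", 32: "coluna_2", 35: "coluna_2",
--         3: "coluna_3", 6: "coluna_3", 9: "coluna_3", 12: "coluna_3", 15: "coluna_3", 18: "coluna_3",
--         21: "coluna_3", 24: "coluna_3", 27: "coluna_3", 30: "coluna_3", 33: "coluna_3", 36: "coluna_3"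
--     }
--
--     # Converter números para colunas
--     resultados_colunas = []
--     for numero, _ in resultados:
--         if numero == 0:  # Ignorar o número 0 (verde)
--             continue
--         resultados_colunas.append(colunas[numero])
--
--     # Calcular repetições consecutivas
--     repeticoes_recentes = {"coluna_1": 0, "coluna_2": 0, "coluna_3": 0}
--     coluna_atual = None
--     contador = 0
--
--     for col in resultados_colunas:
--         if col == coluna_atual:
--             contador += 1
--         else:
--             if contador > 1:  # Considerar apenas sequências de 2 ou mais repetições
--                 repeticoes_recentes[coluna_atual] = contador
--             coluna_atual = col
--             contador = 1
--
--     # Verificar a última sequência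
--     if contador > 1:
--         repeticoes_recentes[coluna_atual] = contador
--
--     return repeticoes_recentes
-- ===== SOURCE B (Python) =====
-- def calcular_repeticoes_recentes(resultados):
--     # Same number->column mapping as the original (invalid numbers still KeyError).
--     colunas = {
--         1: "coluna_1", 4: "coluna_1", 7: "coluna_1", 10: "coluna_1", 13: "coluna_1", 16: "coluna_1",
--         19: "coluna_1", 22: "coluna_1", 25: "coluna_1", 28: "coluna_1", 31: "coluna_1", 34: "coluna_1",
--         2: "coluna_2", 5: "coluna_2", 8: "coluna_2", 11: "coluna_2", 14: "coluna_2", 17: "coluna_2",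
--         20: "coluna_2", 23: "coluna_2", 26: "coluna_2", 29: "coluna_2", 32: "coluna_2", 35: "coluna_2",
--         3: "coluna_3", 6: "coluna_3", 9: "coluna_3", 12: "coluna_3", 15: "coluna_3", 18: "coluna_3",
--         21: "coluna_3", 24: "coluna_3", 27: "coluna_3", 30: "coluna_3", 33: "coluna_3", 36: "coluna_3"
--     }
--     cols = [colunas[n] for n, _ in resultados if n != 0]
--     # Run-length encode the column sequence, most recent run first.
--     runs = []
--     for c in cols:
--         if runs and runs[0][0] == c:
--             runs[0][1] += 1
--         else:
--             runs.insert(0, [c, 1])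
--     # Each column's value: its most recent run of length >= 2, else 0.
--     return {c: next((n for rc, n in runs if rc == c and n > 1), 0)
--             for c in ("coluna_1", "coluna_2", "coluna_3")}
-- ===== Notes on version B (the rewrite author's own statement) =====
-- stated objective: alternative
-- what changed: Replaces A's stateful run counter (coluna_atual/contador with an end-of-loop flush that overwrites the dict) by run-length encoding the column sequence newest-run-first and then, per column, picking its most recent run of length >= 2 (else 0).
import Mathlib
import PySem

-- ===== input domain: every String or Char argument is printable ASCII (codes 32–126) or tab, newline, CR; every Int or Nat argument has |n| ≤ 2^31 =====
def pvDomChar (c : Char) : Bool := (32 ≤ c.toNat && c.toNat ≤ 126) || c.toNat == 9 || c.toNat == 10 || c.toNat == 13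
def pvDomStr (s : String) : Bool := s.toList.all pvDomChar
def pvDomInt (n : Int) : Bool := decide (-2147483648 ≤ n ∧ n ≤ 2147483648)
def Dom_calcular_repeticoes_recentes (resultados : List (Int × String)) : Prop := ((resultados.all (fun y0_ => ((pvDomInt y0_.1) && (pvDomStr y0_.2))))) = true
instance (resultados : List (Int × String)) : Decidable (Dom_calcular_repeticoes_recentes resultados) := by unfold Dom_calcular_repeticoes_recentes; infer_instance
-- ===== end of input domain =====

-- B replaces A's stateful run counter (current column + counter + final flush) by a
-- run-length encoding (newest run first) followed by a per-column search for the most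
-- recent run of length ≥ 2 (objective: alternative decomposition, same cost).

-- ===== PORT A =====

-- the number → column dict literal (shared data table, used verbatim by both Pythons)
def colunasTable : PySem.Dict Int String := PySem.Dict.mk [
  (1, "coluna_1"), (4, "coluna_1"), (7, "coluna_1"), (10, "coluna_1"), (13, "coluna_1"), (16, "coluna_1"),
  (19, "coluna_1"), (22, "coluna_1"), (25, "coluna_1"), (28, "coluna_1"), (31, "coluna_1"), (34, "coluna_1"),
  (2, "coluna_2"), (5, "coluna_2"), (8, "coluna_2"), (11, "coluna_2"), (14, "coluna_2"), (17, "coluna_2"),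
  (20, "coluna_2"), (23, "coluna_2"), (26, "coluna_2"), (29, "coluna_2"), (32, "coluna_2"), (35, "coluna_2"),
  (3, "coluna_3"), (6, "coluna_3"), (9, "coluna_3"), (12, "coluna_3"), (15, "coluna_3"), (18, "coluna_3"),
  (21, "coluna_3"), (24, "coluna_3"), (27, "coluna_3"), (30, "coluna_3"), (33, "coluna_3"), (36, "coluna_3")]

-- body of A's run-counting loop (state: (repeticoes_recentes, coluna_atual, contador));
-- Python's `col == coluna_atual` with coluna_atual possibly None is `some col == atual`
def pvStepA (st : PySem.Dict String Int × Option String × Int) (col : String) :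
    PySem.Dict String Int × Option String × Int :=
  if (some col : Option String) == st.2.1 then (st.1, st.2.1, st.2.2 + 1)
  else ((if st.2.2 > 1 then st.1.insert (st.2.1.getD "") st.2.2 else st.1), some col, (1 : Int))

-- getD "" is only reached outside Pre_ (where Python raises KeyError); under Pre_ the key is present
def calcular_repeticoes_recentes (resultados : List (Int × String)) : List (String × Int) :=
  let resultados_colunas := resultados.foldl
    (fun acc p => if p.1 == 0 then acc else acc ++ [PySem.Dict.getD colunasTable p.1 ""]) []
  let init : PySem.Dict String Int :=
    PySem.Dict.mk [("coluna_1", 0), ("coluna_2", 0), ("coluna_3", 0)]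
  let fin := resultados_colunas.foldl pvStepA (init, none, 0)
  (if fin.2.2 > 1 then fin.1.insert (fin.2.1.getD "") fin.2.2 else fin.1).items

-- ===== PORT B =====

-- next((n for rc, n in runs if rc == c and n > 1), 0)
def pvFirstRun (runs : List (String × Int)) (c : String) : Int :=
  match runs with
  | [] => 0
  | (rc, n) :: t => if rc == c && n > 1 then n else pvFirstRun t c

-- body of B's run-length-encoding loop (newest run kept at the front)
def pvStepB (runs : List (String × Int)) (c : String) : List (String × Int) :=
  match runs with
  | (rc, n) :: t => if rc == c then (rc, n + 1) :: t else (c, 1) :: (rc, n) :: t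
  | [] => [(c, 1)]

def calcular_repeticoes_recentes_alt (resultados : List (Int × String)) : List (String × Int) :=
  let cols := (resultados.filter (fun p => p.1 != 0)).map
    (fun p => PySem.Dict.getD colunasTable p.1 "")
  let runs := cols.foldl pvStepB []
  (["coluna_1", "coluna_2", "coluna_3"] : List String).map (fun c => (c, pvFirstRun runs c))

-- ===== PRECONDITION & SPEC =====
-- Pre_ excludes numbers outside {0, 1..36}: there Python A (and B alike) raises KeyError.
def Pre_calcular_repeticoes_recentes (resultados : List (Int × String)) : Prop :=
  ∀ p ∈ resultados, p.1 = 0 ∨ (1 ≤ p.1 ∧ p.1 ≤ 36)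
instance (resultados : List (Int × String)) : Decidable (Pre_calcular_repeticoes_recentes resultados) := by
  unfold Pre_calcular_repeticoes_recentes; infer_instance

def pvWitness_calcular_repeticoes_recentes : (List (Int × String)) :=
  [(5, "red"), (5, "red"), (0, "green"), (8, "black"), (3, "red")]

def Spec_calcular_repeticoes_recentes (resultados : List (Int × String)) (out : List (String × Int)) : Prop := out = calcular_repeticoes_recentes_alt resultados
instance (resultados : List (Int × String)) (out : List (String × Int)) : Decidable (Spec_calcular_repeticoes_recentes resultados out) := by unfold Spec_calcular_repeticoes_recentes; infer_instance

-- ===== CLAIM (what is proved, stated in full; the proofs are below) =====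
def Claim_equal_calcular_repeticoes_recentes : Prop := ∀ (resultados : List (Int × String)), Dom_calcular_repeticoes_recentes resultados → Pre_calcular_repeticoes_recentes resultados → Spec_calcular_repeticoes_recentes resultados (calcular_repeticoes_recentes resultados)

-- ===== LEMMAS AND PROOFS =====

def pvThree : List String := ["coluna_1", "coluna_2", "coluna_3"]

def pvSelDict (t : List (String × Int)) : PySem.Dict String Int :=
  PySem.Dict.mk [("coluna_1", pvFirstRun t "coluna_1"),
                 ("coluna_2", pvFirstRun t "coluna_2"),
                 ("coluna_3", pvFirstRun t "coluna_3")]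

lemma col_mem (n : Int) (h1 : 1 ≤ n) (h2 : n ≤ 36) :
    PySem.Dict.getD colunasTable n "" ∈ pvThree := by
  interval_cases n <;> decide

lemma colsA_eq (xs : List (Int × String)) (acc : List String) :
    xs.foldl (fun acc p => if p.1 == 0 then acc
                           else acc ++ [PySem.Dict.getD colunasTable p.1 ""]) acc
    = acc ++ (xs.filter (fun p => p.1 != 0)).map
        (fun p => PySem.Dict.getD colunasTable p.1 "") := by
  induction xs generalizing acc with
  | nil => simp
  | cons p t ih =>
    rw [List.foldl_cons]
    cases h : (p.1 == 0) with
    | true =>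
      rw [if_pos rfl, ih, List.filter_cons]
      simp [bne, h]
    | false =>
      rw [if_neg (by simp : ¬ false = true), ih, List.filter_cons]
      simp [bne, h]

def pvInv (s : PySem.Dict String Int × Option String × Int) (rs : List (String × Int)) : Prop :=
  (∀ p ∈ rs, p.1 ∈ pvThree) ∧
  match rs with
  | [] => s = (pvSelDict [], none, 0)
  | (c, n) :: t => s.2.1 = some c ∧ s.2.2 = n ∧ s.1 = pvSelDict t

lemma selDict_cons (c : String) (n : Int) (t : List (String × Int)) (hc : c ∈ pvThree) :
    pvSelDict ((c, n) :: t) = if n > 1 then (pvSelDict t).insert c n else pvSelDict t := by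
  fin_cases hc <;>
    by_cases h : n > 1 <;>
      simp [pvSelDict, pvFirstRun, h, PySem.Dict.insert, PySem.Dict.contains]

lemma inv_step (s : PySem.Dict String Int × Option String × Int) (rs : List (String × Int))
    (c : String) (hc : c ∈ pvThree) (h : pvInv s rs) : pvInv (pvStepA s c) (pvStepB rs c) := by
  obtain ⟨hmem, hst⟩ := h
  cases rs with
  | nil =>
    subst hst
    constructor
    · intro p hp
      have hp' : p = (c, 1) := by simpa [pvStepB] using hp
      simp [hp', hc]
    · simp [pvStepA, pvStepB, pvSelDict, pvFirstRun]
  | cons p t =>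
    obtain ⟨c0, n⟩ := p
    obtain ⟨h1, h2, h3⟩ := hst
    by_cases hcc : c0 = c
    · subst hcc
      constructor
      · intro p hp
        simp [pvStepB] at hp
        rcases hp with h | h
        · have := hmem (c0, n) (by simp); simpa [h] using this
        · exact hmem p (by simp [h])
      · simp [pvStepA, pvStepB, h1, h2, h3]
    · have hc0 : c0 ∈ pvThree := hmem (c0, n) (by simp)
      constructor
      · intro p hp
        simp [pvStepB, hcc] at hp
        rcases hp with h | h | h
        · simp [h, hc]
        · simp [h, hc0]
        · exact hmem p (by simp [h])
      · have hne : ¬ ((some c : Option String) == s.2.1) := by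
          simp [h1]; exact fun e => hcc e.symm
        simp only [pvStepB, if_neg (by simp [hcc] : ¬ (c0 == c) = true)]
        refine ⟨?_, ?_, ?_⟩
        · simp [pvStepA, hne]
        · simp [pvStepA, hne]
        · simp only [pvStepA, if_neg hne]
          rw [selDict_cons c0 n t hc0]
          simp [h1, h2, h3]

lemma inv_foldl (cols : List String) (hcols : ∀ c ∈ cols, c ∈ pvThree)
    (s : PySem.Dict String Int × Option String × Int) (rs : List (String × Int))
    (h : pvInv s rs) : pvInv (cols.foldl pvStepA s) (cols.foldl pvStepB rs) := by
  induction cols generalizing s rs with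
  | nil => exact h
  | cons c t ih =>
    exact ih (fun x hx => hcols x (by simp [hx])) _ _
      (inv_step s rs c (hcols c (by simp)) h)

lemma inv_final (s : PySem.Dict String Int × Option String × Int) (rs : List (String × Int))
    (h : pvInv s rs) :
    (if s.2.2 > 1 then s.1.insert (s.2.1.getD "") s.2.2 else s.1) = pvSelDict rs := by
  obtain ⟨hmem, hst⟩ := h
  cases rs with
  | nil => subst hst; norm_num
  | cons p t =>
    obtain ⟨c0, n⟩ := p
    obtain ⟨h1, h2, h3⟩ := hst
    rw [selDict_cons c0 n t (hmem (c0, n) (by simp))]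
    simp [h1, h2, h3]

-- ===== VERDICT (by name: the statement is the Claim_ definition above) =====
theorem calcular_repeticoes_recentes_spec : Claim_equal_calcular_repeticoes_recentes := by
  intro resultados _ hpre
  unfold Spec_calcular_repeticoes_recentes
  unfold calcular_repeticoes_recentes calcular_repeticoes_recentes_alt
  rw [colsA_eq]
  set cols := (resultados.filter (fun p => p.1 != 0)).map
    (fun p => PySem.Dict.getD colunasTable p.1 "") with hcolsdef
  have hcols : ∀ c ∈ cols, c ∈ pvThree := by
    intro c hc
    rw [hcolsdef] at hc
    simp only [List.mem_map, List.mem_filter] at hc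
    obtain ⟨p, ⟨hp, hnz⟩, rfl⟩ := hc
    rcases hpre p hp with h0 | ⟨ha, hb⟩
    · simp [h0] at hnz
    · exact col_mem p.1 ha hb
  have hinit : pvInv (PySem.Dict.mk [("coluna_1", 0), ("coluna_2", 0), ("coluna_3", 0)], none, 0) [] := by
    constructor
    · intro p hp; simp at hp
    · simp [pvSelDict, pvFirstRun]
  have hinv := inv_foldl cols hcols _ [] hinit
  have hfin := inv_final _ _ hinv
  simp only [List.nil_append, hfin]
  rfl
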